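-- pv_equiv track=rewrite | github.com/Rishabhvrm/CS50P | plates/plates.py | no_period
-- ===== SOURCE A (Python) =====
-- import string
--
-- def no_period(s):
--
--     # check for punctation in s
--     for p in string.punctuation:
--         if p in s:
--             return False
--
--     # check for whitespace in s
--     for p in string.whitespace:
--         if p in s:
--             return False
--
--     return True
-- ===== SOURCE B (Python) =====
-- import string
--
-- _FORBIDDEN = set(string.punctuation + string.whitespace)
--
-- def no_period(s):
--     for c in s:
--         if c in _FORBIDDEN:
--             return False
--     return True
-- ===== Notes on version B (the rewrite author's own statement) =====
-- stated objective: idiomatic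
-- what changed: B makes a single pass over the input string testing each character against a precomputed forbidden set, instead of A's one scan of s per punctuation/whitespace symbol (38 scans).
import Mathlib
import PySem

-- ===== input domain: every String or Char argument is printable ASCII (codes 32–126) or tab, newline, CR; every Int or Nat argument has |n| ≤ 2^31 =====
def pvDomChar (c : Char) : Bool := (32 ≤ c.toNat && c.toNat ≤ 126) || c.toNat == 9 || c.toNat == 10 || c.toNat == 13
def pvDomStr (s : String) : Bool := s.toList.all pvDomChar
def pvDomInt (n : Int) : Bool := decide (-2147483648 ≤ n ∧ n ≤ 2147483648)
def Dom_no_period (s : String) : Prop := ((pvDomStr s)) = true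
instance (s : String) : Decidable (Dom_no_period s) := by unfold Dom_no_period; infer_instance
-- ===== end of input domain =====

-- B replaces A's 38 scans of s (one per punctuation/whitespace symbol) by a single pass
-- over s testing each character against a precomputed forbidden set (idiomatic).

-- ===== PORT A =====
-- string.punctuation
def pyPunctuation : List Char := "!\"#$%&'()*+,-./:;<=>?@[\\]^_`{|}~".toList
-- string.whitespace
def pyWhitespace : List Char := [' ', '\t', '\n', '\x0b', '\x0c', '\r']

-- second loop of A: for p in string.whitespace: if p in s: return False; then return True
def noPeriodLoopWS : List Char → List Char → Bool
  | [], _ => true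
  | p :: rest, sl => if sl.contains p then false else noPeriodLoopWS rest sl

-- first loop of A: for p in string.punctuation: if p in s: return False; then fall through
def noPeriodLoopPunct : List Char → List Char → Bool
  | [], sl => noPeriodLoopWS pyWhitespace sl
  | p :: rest, sl => if sl.contains p then false else noPeriodLoopPunct rest sl

def no_period (s : String) : Bool := noPeriodLoopPunct pyPunctuation s.toList

-- ===== PORT B =====
-- _FORBIDDEN = set(string.punctuation + string.whitespace)
def pvForbidden : PySem.Set Char :=
  PySem.Set.ofList ("!\"#$%&'()*+,-./:;<=>?@[\\]^_`{|}~ \t\n\x0b\x0c\r".toList)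

-- for c in s: if c in _FORBIDDEN: return False; return True
def noPeriodAltLoop : List Char → Bool
  | [] => true
  | c :: rest => if PySem.Set.contains pvForbidden c then false else noPeriodAltLoop rest

def no_period_alt (s : String) : Bool := noPeriodAltLoop s.toList

-- ===== PRECONDITION & SPEC =====
def Spec_no_period (s : String) (out : Bool) : Prop := out = no_period_alt s
instance (s : String) (out : Bool) : Decidable (Spec_no_period s out) := by unfold Spec_no_period; infer_instance

-- ===== CLAIM (what is proved, stated in full; the proofs are below) =====
def Claim_equal_no_period : Prop := ∀ (s : String), Dom_no_period s → Spec_no_period s (no_period s)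

-- ===== LEMMAS AND PROOFS =====

theorem loopWS_eq (ps sl : List Char) :
    noPeriodLoopWS ps sl = ps.all (fun p => !sl.contains p) := by
  induction ps with
  | nil => rfl
  | cons p rest ih =>
    simp only [noPeriodLoopWS, List.all_cons, ih]
    by_cases h : sl.contains p <;> simp [h]

theorem loopPunct_eq (ps sl : List Char) :
    noPeriodLoopPunct ps sl
      = (ps.all (fun p => !sl.contains p) && noPeriodLoopWS pyWhitespace sl) := by
  induction ps with
  | nil => simp [noPeriodLoopPunct]
  | cons p rest ih =>
    simp only [noPeriodLoopPunct, List.all_cons, ih]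
    by_cases h : sl.contains p <;> simp [h, Bool.and_assoc]

theorem altLoop_eq (cs : List Char) :
    noPeriodAltLoop cs = cs.all (fun c => !PySem.Set.contains pvForbidden c) := by
  induction cs with
  | nil => rfl
  | cons c rest ih =>
    simp only [noPeriodAltLoop, List.all_cons, ih]
    by_cases h : PySem.Set.contains pvForbidden c <;> simp [h]

theorem forbidden_eq : pvForbidden = pyPunctuation ++ pyWhitespace := by decide

theorem no_period_spec : Claim_equal_no_period := by
  unfold Claim_equal_no_period
  intro s _
  unfold Spec_no_period no_period no_period_alt
  rw [loopPunct_eq, loopWS_eq, altLoop_eq, Bool.eq_iff_iff]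
  simp only [Bool.and_eq_true, List.all_eq_true, Bool.not_eq_true',
    List.contains_eq_mem, decide_eq_false_iff_not, PySem.Set.contains, forbidden_eq,
    List.elem_eq_contains, List.mem_append, not_or]
  constructor
  · rintro ⟨hP, hW⟩ c hc
    exact ⟨fun h => hP c h hc, fun h => hW c h hc⟩
  · intro h
    exact ⟨fun p hp hps => (h p hps).1 hp, fun p hp hps => (h p hps).2 hp⟩
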